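-- pv_equiv track=rewrite | github.com/aaronmorgenegg/cs5050 | assn2/knapsack.py | KnapRecursive
-- ===== SOURCE A (Python) =====
-- def KnapRecursive(n, k1, k2, s):
--     """
--     Recursive solution, where:
--     n   == number of objects
--     k1  == size of knapsack 1
--     k2  == size of knapsack 2
--     s   == sizes of objects
--     """
--     if k1 < 0 or k2 < 0: return False
--     if k1 is 0 and k2 is 0: return True
--     if n is 0: return False
--     return (KnapRecursive(n-1, k1-s[n-1], k2, s) or # Put it in knapsack 1
--             KnapRecursive(n-1, k1, k2-s[n-1], s) or # Put it in knapsack 2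
--             KnapRecursive(n-1, k1, k2, s) # Don't put it in either knapsack
--             )
-- ===== SOURCE B (Python) =====
-- def KnapRecursive(n, k1, k2, s):
--     """Iterative DP: maintain the set of reachable (remaining-k1, remaining-k2)
--     capacity pairs while scanning the first n objects from the back."""
--     if k1 < 0 or k2 < 0:
--         return False
--     states = {(k1, k2)}
--     for size in reversed(s[:n]):
--         new = set()
--         for a, b in states:
--             new.add((a, b))
--             if a - size >= 0:
--                 new.add((a - size, b))
--             if b - size >= 0:
--                 new.add((a, b - size))
--         states = new
--     return (0, 0) in states
-- ===== Notes on version B (the rewrite author's own statement) =====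
-- stated objective: alternative
-- what changed: Replaces the three-way recursion by an iterative breadth-first DP that maintains the set of reachable (remaining-k1, remaining-k2) capacity pairs, merging duplicate states; on random large capacities the state set stays near-exponential, so no speed is claimed.
-- outside the precondition, e.g. on KnapRecursive(-1, 0, 0, []): A returns True, B returns True; on KnapRecursive(3, 1, 0, [1]): A raises IndexError, B returns True
import Mathlib
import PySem

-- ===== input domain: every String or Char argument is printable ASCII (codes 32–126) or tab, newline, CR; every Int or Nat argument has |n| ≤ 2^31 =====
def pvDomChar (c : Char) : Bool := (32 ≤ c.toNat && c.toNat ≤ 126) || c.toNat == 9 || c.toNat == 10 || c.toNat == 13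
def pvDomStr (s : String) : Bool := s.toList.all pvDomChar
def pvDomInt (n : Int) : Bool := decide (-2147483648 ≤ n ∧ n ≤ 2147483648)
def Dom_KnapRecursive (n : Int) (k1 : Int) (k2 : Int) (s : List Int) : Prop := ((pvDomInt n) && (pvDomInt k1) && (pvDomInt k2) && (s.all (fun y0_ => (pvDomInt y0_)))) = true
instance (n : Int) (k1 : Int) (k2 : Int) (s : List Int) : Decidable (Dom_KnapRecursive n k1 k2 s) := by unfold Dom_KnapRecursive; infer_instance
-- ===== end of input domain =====

-- B is an iterative DP over the set of reachable (remaining-k1, remaining-k2)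
-- capacity pairs instead of A's three-way recursion (an alternative algorithm;
-- no speed is claimed); the equivalence is about the return value.

-- ===== PORT A =====
-- fuel = n.toNat; under Pre_ (0 ≤ n ≤ len s) the fuel never runs out, so this is
-- a step-for-step transliteration of A's recursion.
def KnapRecursiveGo (fuel : Nat) (n : Int) (k1 : Int) (k2 : Int) (s : List Int) : Bool :=
  if k1 < 0 || k2 < 0 then false
  else if k1 == 0 && k2 == 0 then true
  else if n == 0 then false
  else match fuel with
    | 0 => false  -- unreachable under Pre_
    | f + 1 =>
      let x := (PySem.List.pyGet? s (n - 1)).getD 0  -- s[n-1]; in range under Pre_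
      KnapRecursiveGo f (n-1) (k1 - x) k2 s ||
      KnapRecursiveGo f (n-1) k1 (k2 - x) s ||
      KnapRecursiveGo f (n-1) k1 k2 s

def KnapRecursive (n : Int) (k1 : Int) (k2 : Int) (s : List Int) : Bool :=
  KnapRecursiveGo n.toNat n k1 k2 s

-- ===== PORT B =====
-- one DP step of Source B: from every state (a,b) keep it and add the two guarded moves
def knapStep (size : Int) (states : PySem.Set (Int × Int)) : PySem.Set (Int × Int) :=
  states.foldl (fun acc p =>
    let acc1 := PySem.Set.add acc p
    let acc2 := if 0 ≤ p.1 - size then PySem.Set.add acc1 (p.1 - size, p.2) else acc1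
    if 0 ≤ p.2 - size then PySem.Set.add acc2 (p.1, p.2 - size) else acc2)
    PySem.Set.empty

def KnapRecursive_alt (n : Int) (k1 : Int) (k2 : Int) (s : List Int) : Bool :=
  if k1 < 0 || k2 < 0 then false
  else
    let final := ((PySem.List.slice s none (some n)).reverse).foldl
      (fun st size => knapStep size st) (PySem.Set.ofList [(k1, k2)])
    PySem.Set.contains final (0, 0)

-- ===== PRECONDITION & SPEC =====
-- Pre_ excludes n < 0 (A recurses without bound, RecursionError, unless an early
-- zero/negative check fires first) and n > len(s) (A hits an IndexError unless an
-- early check fires first); the few returns A still makes there are artefacts of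
-- check order, and B's slice behaviour there is accidental too.
def Pre_KnapRecursive (n : Int) (k1 : Int) (k2 : Int) (s : List Int) : Prop :=
  0 ≤ n ∧ n ≤ s.length
instance (n : Int) (k1 : Int) (k2 : Int) (s : List Int) : Decidable (Pre_KnapRecursive n k1 k2 s) := by unfold Pre_KnapRecursive; infer_instance
def pvWitness_KnapRecursive : Int × Int × Int × List Int := (3, 4, 2, [2, 2, 4])
def Spec_KnapRecursive (n : Int) (k1 : Int) (k2 : Int) (s : List Int) (out : Bool) : Prop := out = KnapRecursive_alt n k1 k2 s
instance (n : Int) (k1 : Int) (k2 : Int) (s : List Int) (out : Bool) : Decidable (Spec_KnapRecursive n k1 k2 s out) := by unfold Spec_KnapRecursive; infer_instance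

-- ===== CLAIM (what is proved, stated in full; the proofs are below) =====
def Claim_equal_KnapRecursive : Prop := ∀ (n : Int) (k1 : Int) (k2 : Int) (s : List Int), Dom_KnapRecursive n k1 k2 s → Pre_KnapRecursive n k1 k2 s → Spec_KnapRecursive n k1 k2 s (KnapRecursive n k1 k2 s)

-- ===== LEMMAS AND PROOFS =====

-- structural reference version of A's recursion: items are s[n-1], s[n-2], …, s[0]
def knapL (items : List Int) (k1 : Int) (k2 : Int) : Bool :=
  if k1 < 0 || k2 < 0 then false
  else if k1 == 0 && k2 == 0 then true
  else match items with
    | [] => false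
    | x :: rest => knapL rest (k1 - x) k2 || knapL rest k1 (k2 - x) || knapL rest k1 k2

lemma knapL_neg {items : List Int} {a b : Int} (h : a < 0 ∨ b < 0) :
    knapL items a b = false := by
  cases items <;> · unfold knapL; rcases h with h | h <;> simp [h]

lemma knapL_zero (items : List Int) : knapL items 0 0 = true := by
  cases items <;> simp [knapL]

lemma knapL_cons {a b : Int} (x : Int) (rest : List Int) (ha : 0 ≤ a) (hb : 0 ≤ b) :
    knapL (x :: rest) a b =
      (knapL rest (a - x) b || knapL rest a (b - x) || knapL rest a b) := by
  conv_lhs => rw [knapL]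
  by_cases hz : a = 0 ∧ b = 0
  · obtain ⟨rfl, rfl⟩ := hz
    simp [knapL_zero]
  · have h1 : ¬ (a < 0 || b < 0) = true := by simp; omega
    have h2 : ¬ (a == 0 && b == 0) = true := by
      simp only [Bool.and_eq_true, beq_iff_eq]; tauto
    rw [if_neg h1, if_neg h2]

-- A's port equals the structural version under Pre_
lemma go_eq_knapL : ∀ (m : Nat) (k1 k2 : Int) (s : List Int), m ≤ s.length →
    KnapRecursiveGo m (m : Int) k1 k2 s = knapL ((s.take m).reverse) k1 k2 := by
  intro m
  induction m with
  | zero => intro k1 k2 s _; simp [KnapRecursiveGo, knapL]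
  | succ f ih =>
    intro k1 k2 s hm
    have hf : f < s.length := by omega
    have htake : (s.take (f + 1)).reverse = s[f] :: (s.take f).reverse := by
      rw [List.take_succ]
      simp [hf]
    rw [htake]
    by_cases h1 : (k1 < 0 || k2 < 0) = true
    · have h1' : k1 < 0 ∨ k2 < 0 := by simpa using h1
      rw [knapL_neg h1']
      unfold KnapRecursiveGo
      rw [if_pos h1]
    · have hk1 : 0 ≤ k1 := by simp at h1; omega
      have hk2 : 0 ≤ k2 := by simp at h1; omega
      rw [knapL_cons _ _ hk1 hk2]
      by_cases h2 : (k1 == 0 && k2 == 0) = true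
      · simp only [Bool.and_eq_true, beq_iff_eq] at h2
        obtain ⟨rfl, rfl⟩ := h2
        unfold KnapRecursiveGo
        rw [if_neg h1, if_pos (by simp)]
        simp [knapL_zero]
      · have hn : ¬ (((f + 1 : Nat) : Int) == 0) = true := by
          simp only [beq_iff_eq]
          push_cast
          omega
        have hxv : (PySem.List.pyGet? s (((f + 1 : Nat) : Int) - 1)).getD 0 = s[f] := by
          have harg : ((f + 1 : Nat) : Int) - 1 = (f : Int) := by push_cast; ring
          rw [harg, PySem.List.pyGet?_natCast]
          simp [hf]
        have harg : ((f + 1 : Nat) : Int) - 1 = (f : Int) := by push_cast; ring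
        unfold KnapRecursiveGo
        rw [if_neg h1, if_neg h2, if_neg hn]
        simp only [harg]
        have hxv2 : (PySem.List.pyGet? s (f : Int)).getD 0 = s[f] := by
          rw [PySem.List.pyGet?_natCast]; simp [hf]
        rw [hxv2]
        rw [ih _ _ _ (le_of_lt hf), ih _ _ _ (le_of_lt hf), ih _ _ _ (le_of_lt hf)]

-- membership in one DP step
lemma mem_knapStep (size : Int) (states : PySem.Set (Int × Int)) (q : Int × Int) :
    q ∈ knapStep size states ↔
      ∃ p ∈ states, q = p ∨ (0 ≤ p.1 - size ∧ q = (p.1 - size, p.2)) ∨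
        (0 ≤ p.2 - size ∧ q = (p.1, p.2 - size)) := by
  unfold knapStep
  suffices h : ∀ (l init : List (Int × Int)),
      q ∈ l.foldl (fun acc p =>
        let acc1 := PySem.Set.add acc p
        let acc2 := if 0 ≤ p.1 - size then PySem.Set.add acc1 (p.1 - size, p.2) else acc1
        if 0 ≤ p.2 - size then PySem.Set.add acc2 (p.1, p.2 - size) else acc2) init ↔
      q ∈ init ∨ ∃ p ∈ l, q = p ∨ (0 ≤ p.1 - size ∧ q = (p.1 - size, p.2)) ∨
        (0 ≤ p.2 - size ∧ q = (p.1, p.2 - size)) by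
    rw [h]
    simp [PySem.Set.empty]
  intro l
  induction l with
  | nil => intro init; simp
  | cons p rest ih =>
    intro init
    rw [List.foldl_cons, ih]
    have hmem : q ∈ (let acc1 := PySem.Set.add init p
        let acc2 := if 0 ≤ p.1 - size then PySem.Set.add acc1 (p.1 - size, p.2) else acc1
        if 0 ≤ p.2 - size then PySem.Set.add acc2 (p.1, p.2 - size) else acc2) ↔
        q ∈ init ∨ q = p ∨ (0 ≤ p.1 - size ∧ q = (p.1 - size, p.2)) ∨
          (0 ≤ p.2 - size ∧ q = (p.1, p.2 - size)) := by
      simp only []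
      split_ifs with hA hB hB <;>
        simp only [sub_nonneg] at hA hB <;>
        simp [PySem.Set.mem_add, hA, hB, Prod.ext_iff, sub_nonneg] <;> tauto
    rw [hmem]
    simp only [List.mem_cons]
    constructor
    · rintro (((h | h) | ⟨p', hp', h'⟩)) 
      · exact Or.inl h
      · exact Or.inr ⟨p, Or.inl rfl, h⟩
      · exact Or.inr ⟨p', Or.inr hp', h'⟩
    · rintro (h | ⟨p', (rfl | hp'), h'⟩)
      · exact Or.inl (Or.inl h)
      · exact Or.inl (Or.inr h')
      · exact Or.inr ⟨p', hp', h'⟩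

lemma knapStep_nonneg {size : Int} {states : PySem.Set (Int × Int)}
    (h : ∀ p ∈ states, 0 ≤ p.1 ∧ 0 ≤ p.2) :
    ∀ q ∈ knapStep size states, 0 ≤ q.1 ∧ 0 ≤ q.2 := by
  intro q hq
  rw [mem_knapStep] at hq
  obtain ⟨p, hp, (rfl | ⟨hg, rfl⟩ | ⟨hg, rfl⟩)⟩ := hq
  · exact h _ hp
  · exact ⟨hg, (h _ hp).2⟩
  · exact ⟨(h _ hp).1, hg⟩

-- main DP invariant: (0,0) reachable through the remaining items ↔ some current
-- state is accepted by A's recursion on those items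
lemma main_inv : ∀ (items : List Int) (states : PySem.Set (Int × Int)),
    (∀ p ∈ states, 0 ≤ p.1 ∧ 0 ≤ p.2) →
    (((0, 0) : Int × Int) ∈ items.foldl (fun st size => knapStep size st) states ↔
      ∃ p ∈ states, knapL items p.1 p.2 = true) := by
  intro items
  induction items with
  | nil =>
    intro states h
    simp only [List.foldl_nil]
    constructor
    · intro hm; exact ⟨(0, 0), hm, knapL_zero []⟩
    · rintro ⟨⟨a, b⟩, hp, hk⟩
      have := h _ hp
      unfold knapL at hk
      have h1 : ¬ (a < 0 || b < 0) = true := by simp; omega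
      simp only [h1, if_false] at hk
      by_cases h2 : (a == 0 && b == 0) = true
      · simp only [Bool.and_eq_true, beq_iff_eq] at h2
        obtain ⟨rfl, rfl⟩ := h2; exact hp
      · simp [h2] at hk
  | cons x rest ih =>
    intro states h
    rw [List.foldl_cons, ih _ (knapStep_nonneg h)]
    constructor
    · rintro ⟨q, hq, hk⟩
      rw [mem_knapStep] at hq
      obtain ⟨p, hp, (rfl | ⟨hg, rfl⟩ | ⟨hg, rfl⟩)⟩ := hq
      · refine ⟨_, hp, ?_⟩
        rw [knapL_cons x rest (h _ hp).1 (h _ hp).2]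
        simp [hk]
      · refine ⟨_, hp, ?_⟩
        rw [knapL_cons x rest (h _ hp).1 (h _ hp).2]
        simp only [] at hk
        simp [hk]
      · refine ⟨_, hp, ?_⟩
        rw [knapL_cons x rest (h _ hp).1 (h _ hp).2]
        simp only [] at hk
        simp [hk]
    · rintro ⟨p, hp, hk⟩
      rw [knapL_cons x rest (h p hp).1 (h p hp).2] at hk
      simp only [Bool.or_eq_true] at hk
      rcases hk with (hk | hk) | hk
      · have hg : 0 ≤ p.1 - x := by
          by_contra hneg
          rw [knapL_neg (Or.inl (by omega))] at hk; exact absurd hk (by simp)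
        exact ⟨(p.1 - x, p.2), (mem_knapStep x states _).2 ⟨p, hp, Or.inr (Or.inl ⟨hg, rfl⟩)⟩, hk⟩
      · have hg : 0 ≤ p.2 - x := by
          by_contra hneg
          rw [knapL_neg (Or.inr (by omega))] at hk; exact absurd hk (by simp)
        exact ⟨(p.1, p.2 - x), (mem_knapStep x states _).2 ⟨p, hp, Or.inr (Or.inr ⟨hg, rfl⟩)⟩, hk⟩
      · exact ⟨p, (mem_knapStep x states _).2 ⟨p, hp, Or.inl rfl⟩, hk⟩

-- ===== VERDICT (by name: the statement is the Claim_ definition above) =====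
theorem KnapRecursive_spec : Claim_equal_KnapRecursive := by
  intro n k1 k2 s _ hpre
  obtain ⟨hn0, hnlen⟩ := hpre
  unfold Spec_KnapRecursive KnapRecursive KnapRecursive_alt
  by_cases hneg : (k1 < 0 || k2 < 0) = true
  · rw [if_pos hneg]
    unfold KnapRecursiveGo
    rw [if_pos hneg]
  · rw [if_neg hneg]
    have hcast : ((n.toNat : Nat) : Int) = n := Int.toNat_of_nonneg hn0
    have hlen : n.toNat ≤ s.length := by omega
    have hA := go_eq_knapL n.toNat k1 k2 s hlen
    rw [hcast] at hA
    have hslice : PySem.List.slice s none (some n) = s.take n.toNat := by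
      conv_lhs => rw [← hcast]
      rw [PySem.List.slice_to_natCast]
    simp only [Bool.or_eq_true, decide_eq_true_eq, not_or] at hneg
    have hinit : ∀ p ∈ PySem.Set.ofList [((k1 : Int), (k2 : Int))], 0 ≤ p.1 ∧ 0 ≤ p.2 := by
      intro p hp
      rw [PySem.Set.mem_ofList] at hp
      simp only [List.mem_singleton] at hp
      subst hp
      constructor <;> omega
    have hm := main_inv ((s.take n.toNat).reverse) (PySem.Set.ofList [(k1, k2)]) hinit
    have hiff : (((0, 0) : Int × Int) ∈ ((s.take n.toNat).reverse).foldl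
        (fun st size => knapStep size st) (PySem.Set.ofList [(k1, k2)])) ↔
        knapL ((s.take n.toNat).reverse) k1 k2 = true := by
      rw [hm]
      constructor
      · rintro ⟨p, hp, hk⟩
        rw [PySem.Set.mem_ofList, List.mem_singleton] at hp
        subst hp
        exact hk
      · intro hk
        exact ⟨(k1, k2), by rw [PySem.Set.mem_ofList]; simp, hk⟩
    have hcon : PySem.Set.contains (((s.take n.toNat).reverse).foldl
        (fun st size => knapStep size st) (PySem.Set.ofList [(k1, k2)])) (0, 0) =
        knapL ((s.take n.toNat).reverse) k1 k2 := by
      cases hb : knapL ((s.take n.toNat).reverse) k1 k2 with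
      | true => exact (PySem.Set.contains_iff _ _).2 (hiff.2 hb)
      | false =>
        rw [← Bool.not_eq_true]
        intro hcontr
        rw [hiff.1 ((PySem.Set.contains_iff _ _).1 hcontr)] at hb
        exact Bool.noConfusion hb
    rw [hA, hslice, hcon]
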